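-- pv_equiv track=rewrite | github.com/Balajistark073/Python-programs | matrixprimecnt.py | column_with_most_primes
-- ===== SOURCE A (Python) =====
-- def isprime(num):
--     if num < 2:
--         return False
--     for i in range(2, int(num ** 0.5) + 1):
--         if num % i == 0:
--             return False
--     return True
--
-- def column_with_most_primes(matrix):
--     if not matrix:
--         return None
--     num_rows = len(matrix)
--     num_cols = len(matrix[0])
--     max_prime_count = 0
--     max_prime_column = -1
--     for col in range(num_cols):
--         prime_count = sum(1 for row in range(num_rows) if isprime(matrix[row][col]))
--         if prime_count > max_prime_count:
--             max_prime_count = prime_count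
--             max_prime_column = col
--     return max_prime_column
-- ===== SOURCE B (Python) =====
-- def isprime(num):
--     if num < 2:
--         return False
--     for i in range(2, int(num ** 0.5) + 1):
--         if num % i == 0:
--             return False
--     return True
--
-- def column_with_most_primes(matrix):
--     if not matrix:
--         return None
--     num_cols = len(matrix[0])
--     # pass 1: per-column prime tally, accumulated row-major
--     counts = [0] * num_cols
--     for row in matrix:
--         counts = [c + (1 if isprime(v) else 0) for c, v in zip(counts, row)]
--     # pass 2: leftmost column whose tally strictly exceeds all previous ones
--     best_count = 0
--     best_col = -1
--     for col, cnt in enumerate(counts):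
--         if cnt > best_count:
--             best_count = cnt
--             best_col = col
--     return best_col
-- ===== Notes on version B (the rewrite author's own statement) =====
-- stated objective: alternative
-- what changed: Replaces A's column-major nested scan (a fresh generator re-indexing matrix[row][col] for every column) with a single row-major sweep that zips each row into a per-column tally list, followed by a separate strict-> leftmost selection pass over the tallies.
import Mathlib
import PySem

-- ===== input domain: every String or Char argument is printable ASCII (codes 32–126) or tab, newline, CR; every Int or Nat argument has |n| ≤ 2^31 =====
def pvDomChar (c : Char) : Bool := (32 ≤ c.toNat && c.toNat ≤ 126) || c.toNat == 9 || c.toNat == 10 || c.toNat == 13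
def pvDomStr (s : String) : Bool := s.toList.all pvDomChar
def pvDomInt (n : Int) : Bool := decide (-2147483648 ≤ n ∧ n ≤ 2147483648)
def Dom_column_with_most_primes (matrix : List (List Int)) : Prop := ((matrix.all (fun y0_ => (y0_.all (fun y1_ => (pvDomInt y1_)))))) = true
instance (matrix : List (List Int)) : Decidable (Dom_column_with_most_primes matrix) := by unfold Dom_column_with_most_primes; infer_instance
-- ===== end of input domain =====

-- B is a row-major two-pass (tally list, then selection) re-decomposition of A's
-- column-major scan; equal return values on rectangular-enough matrices (Pre_).

-- ===== PORT A =====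
-- shared helper: both Pythons contain this identical `isprime`.
-- `int(num ** 0.5)` is ported as `Nat.sqrt`: exact for 0 ≤ num ≤ 2^31 (double sqrt
-- is correctly rounded there; a possible +1 off candidate divisor never divides num).
def pvIsprime (num : Int) : Bool :=
  if num < 2 then false
  else (PySem.List.pyRange 2 (Int.ofNat (Nat.sqrt num.toNat) + 1) 1).all
    (fun i => !(PySem.Int.mod num i == 0))

-- `matrix[row]` has row ∈ range(len(matrix)) so it is always in range; `row[col]`
-- is in range for every input admitted by Pre_, so `getD` is exact there.
def column_with_most_primes (matrix : List (List Int)) : Option Int :=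
  if matrix = [] then none
  else
    let numRows := matrix.length
    let numCols := matrix.headI.length
    let st := (List.range numCols).foldl (fun (st : Nat × Int) col =>
      let primeCount := (List.range numRows).foldl
        (fun acc row => if pvIsprime ((matrix.getD row []).getD col 0) then acc + 1 else acc) 0
      if primeCount > st.1 then (primeCount, Int.ofNat col) else st) (0, -1)
    some st.2

-- ===== PORT B =====
-- `zip(counts, row)` truncates to the shorter list, as Lean's `List.zip` does.
def column_with_most_primes_alt (matrix : List (List Int)) : Option Int :=
  if matrix = [] then none
  else
    let numCols := matrix.headI.length
    let counts := matrix.foldl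
      (fun (cs : List Nat) row =>
        (cs.zip row).map (fun cv => cv.1 + if pvIsprime cv.2 then 1 else 0))
      (List.replicate numCols 0)
    let st := counts.foldl (fun (st : Nat × Nat × Int) cnt =>
      if cnt > st.2.1 then (st.1 + 1, cnt, Int.ofNat st.1)
      else (st.1 + 1, st.2.1, st.2.2)) (0, 0, -1)
    some st.2.2

-- ===== PRECONDITION & SPEC =====
-- Pre_ excludes only the jagged matrices on which A raises IndexError
-- (some row shorter than the first row).
def Pre_column_with_most_primes (matrix : List (List Int)) : Prop :=
  ∀ row ∈ matrix, matrix.headI.length ≤ row.length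
instance (matrix : List (List Int)) : Decidable (Pre_column_with_most_primes matrix) := by
  unfold Pre_column_with_most_primes; infer_instance
def pvWitness_column_with_most_primes : List (List Int) := [[2, 3], [4, 5]]

def Spec_column_with_most_primes (matrix : List (List Int)) (out : Option Int) : Prop := out = column_with_most_primes_alt matrix
instance (matrix : List (List Int)) (out : Option Int) : Decidable (Spec_column_with_most_primes matrix out) := by unfold Spec_column_with_most_primes; infer_instance

-- ===== CLAIM (what is proved, stated in full; the proofs are below) =====
def Claim_equal_column_with_most_primes : Prop := ∀ (matrix : List (List Int)), Dom_column_with_most_primes matrix → Pre_column_with_most_primes matrix → Spec_column_with_most_primes matrix (column_with_most_primes matrix)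

-- ===== LEMMAS AND PROOFS =====

-- prime count of column `col`, as a fold over the rows
def pvColCnt (m : List (List Int)) (col : Nat) : Nat :=
  m.foldl (fun a row => if pvIsprime (row.getD col 0) then a + 1 else a) 0

-- A's inner `range(num_rows)` fold reads the rows in order
theorem pv_foldl_range_getD {α β : Type} (g : β → α → β) (d : α) :
    ∀ (l : List α) (z : β),
      (List.range l.length).foldl (fun a i => g a (l.getD i d)) z = l.foldl g z := by
  intro l
  induction l with
  | nil => intro z; simp
  | cons x xs ih =>
      intro z
      simp only [List.length_cons, List.range_succ_eq_map, List.foldl_cons, List.foldl_map,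
        List.getD_cons_zero, List.getD_cons_succ]
      exact ih (g z x)

theorem pv_colCnt_shift (col : Nat) :
    ∀ (m : List (List Int)) (z : Nat),
      m.foldl (fun a row => if pvIsprime (row.getD col 0) then a + 1 else a) z
        = z + pvColCnt m col := by
  intro m
  induction m with
  | nil => intro z; simp [pvColCnt]
  | cons r rs ih =>
      intro z
      simp only [pvColCnt, List.foldl_cons] at *
      rw [ih, ih (if pvIsprime (r.getD col 0) then 0 + 1 else 0)]
      split <;> omega

-- pass 1: the tally list is the per-column count list
theorem pv_counts_spec :
    ∀ (m : List (List Int)) (cs : List Nat), (∀ row ∈ m, cs.length ≤ row.length) →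
      m.foldl (fun (cs : List Nat) row =>
          (cs.zip row).map (fun cv => cv.1 + if pvIsprime cv.2 then 1 else 0)) cs
        = (List.range cs.length).map (fun col => cs.getD col 0 + pvColCnt m col) := by
  intro m
  induction m with
  | nil =>
      intro cs _
      apply List.ext_getElem
      · simp
      · intro i h1 h2
        simp only [List.foldl_nil] at h1 ⊢
        simp only [List.getElem_map, List.getElem_range]
        simp [pvColCnt, List.getD_eq_getElem?_getD, List.getElem?_eq_getElem h1]
  | cons r rs ih =>
      intro cs hlen
      have hr : cs.length ≤ r.length := hlen r (by simp)
      have hzl : ((cs.zip r).map (fun cv => cv.1 + if pvIsprime cv.2 then 1 else 0)).length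
          = cs.length := by simp [List.length_zip]; omega
      simp only [List.foldl_cons]
      rw [ih _ (by intro row hm; rw [hzl]; exact hlen row (by simp [hm]))]
      rw [hzl]
      apply List.ext_getElem
      · simp
      · intro i h1 h2
        simp only [List.length_map, List.length_range] at h1
        have hir : i < r.length := lt_of_lt_of_le h1 hr
        have hiz : i < (cs.zip r).length := by simp [List.length_zip]; omega
        simp only [List.getElem_map, List.getElem_range]
        have hget : ((cs.zip r).map (fun cv => cv.1 + if pvIsprime cv.2 then 1 else 0)).getD i 0
            = cs[i] + (if pvIsprime r[i] then 1 else 0) := by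
          simp [List.getD_eq_getElem?_getD, List.getElem?_eq_getElem hiz, List.getElem_zip]
        rw [hget]
        have hcons : pvColCnt (r :: rs) i = (if pvIsprime (r.getD i 0) then 1 else 0) + pvColCnt rs i := by
          unfold pvColCnt
          rw [List.foldl_cons, pv_colCnt_shift i rs]
          unfold pvColCnt
          split <;> omega
        have hrd : r.getD i 0 = r[i] := by simp [List.getD, List.getElem?_eq_getElem hir]
        have hcd : cs.getD i 0 = cs[i] := by simp [List.getD, List.getElem?_eq_getElem h1]
        rw [hcons, hrd, hcd]
        unfold pvColCnt
        split <;> omega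

-- pass 2: the selection fold over the tallies equals A's selection over columns
theorem pv_sel_spec (f : Nat → Nat) :
    ∀ (n i : Nat) (bc : Nat) (bcol : Int),
      ((List.range' i n).map f).foldl (fun (st : Nat × Nat × Int) cnt =>
          if cnt > st.2.1 then (st.1 + 1, cnt, Int.ofNat st.1)
          else (st.1 + 1, st.2.1, st.2.2)) (i, bc, bcol)
        = (i + n, (List.range' i n).foldl (fun (st : Nat × Int) col =>
            if f col > st.1 then (f col, Int.ofNat col) else st) (bc, bcol)) := by
  intro n
  induction n with
  | zero => intro i bc bcol; simp
  | succ k ih =>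
      intro i bc bcol
      rw [List.range'_succ]
      simp only [List.map_cons, List.foldl_cons, gt_iff_lt]
      by_cases h : bc < f i
      · rw [if_pos h, if_pos h, ih (i + 1) (f i) (Int.ofNat i)]
        refine Prod.ext (by omega) rfl
      · rw [if_neg h, if_neg h, ih (i + 1) bc bcol]
        refine Prod.ext (by omega) rfl

theorem pv_main (matrix : List (List Int)) (hpre : Pre_column_with_most_primes matrix) :
    column_with_most_primes matrix = column_with_most_primes_alt matrix := by
  by_cases hm : matrix = []
  · simp [column_with_most_primes, column_with_most_primes_alt, hm]
  · unfold column_with_most_primes column_with_most_primes_alt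
    rw [if_neg hm, if_neg hm]
    have hcounts := pv_counts_spec matrix (List.replicate matrix.headI.length 0)
      (by intro row hr; rw [List.length_replicate]; exact hpre row hr)
    rw [List.length_replicate] at hcounts
    have hcounts' : matrix.foldl (fun (cs : List Nat) row =>
          (cs.zip row).map (fun cv => cv.1 + if pvIsprime cv.2 then 1 else 0))
          (List.replicate matrix.headI.length 0)
        = (List.range matrix.headI.length).map (fun col => pvColCnt matrix col) := by
      rw [hcounts]
      apply List.map_congr_left
      intro col hcol
      simp [List.mem_range.mp hcol]
    have hinner : ∀ col, (List.range matrix.length).foldl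
        (fun acc row => if pvIsprime ((matrix.getD row []).getD col 0) then acc + 1 else acc) 0
        = pvColCnt matrix col := fun col =>
      pv_foldl_range_getD (fun a row => if pvIsprime (row.getD col 0) then a + 1 else a) [] matrix 0
    simp only [hcounts', List.range_eq_range']
    rw [pv_sel_spec (pvColCnt matrix) matrix.headI.length 0 0 (-1)]
    have hinner' : ∀ col : Nat, (List.range' 0 matrix.length).foldl
        (fun acc row => if pvIsprime ((matrix.getD row []).getD col 0) then acc + 1 else acc) 0
        = pvColCnt matrix col := by
      intro col; rw [← List.range_eq_range']; exact hinner col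
    simp only [hinner']

-- ===== VERDICT (by name: the statement is the Claim_ definition above) =====
theorem column_with_most_primes_spec : Claim_equal_column_with_most_primes := by
  intro matrix _hdom hpre
  unfold Spec_column_with_most_primes
  exact pv_main matrix hpre
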